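-- pv_equiv track=rewrite | github.com/AdamZhouSE/pythonHomework | Code/CodeRecords/2199/60760/257082.py | counted
-- ===== SOURCE A (Python) =====
-- def work(str):                        #找到str的所有双子串
--     length=len(str)
--     result=[]
--     needed=[]
--     for j in range(1, length + 1):
--         for n in range(length - j + 1):
--             son = str[n:n + j]
--             result.append(son)
--
--     for i in result:
--         num=0
--         for j in range(length-len(i)+1):
--             if str[j:j+len(i)]==i:
--                 num=num+1
--         if num>=2:
--             needed.append(i)
--     return needed
--
-- def counted(str):
--     if len(work(str))==0:
--         return 0
--     else:
--         numbers=[]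
--         for i in work(str):
--             numbers.append(counted(i))
--         return max(numbers)+1
-- ===== SOURCE B (Python) =====
-- def counted(str):
--     memo = {}
--
--     def repeated_subs(s):
--         n = len(s)
--         subs = list(dict.fromkeys(s[i:i + j] for j in range(1, n) for i in range(n - j + 1)))
--         return [t for t in subs
--                 if sum(1 for k in range(n - len(t) + 1) if s[k:k + len(t)] == t) >= 2]
--
--     def depth(s):
--         if s in memo:
--             return memo[s]
--         reps = repeated_subs(s)
--         d = 0 if not reps else 1 + max(depth(t) for t in reps)
--         memo[s] = d
--         return d
--
--     return depth(str)
-- ===== Notes on version B (the rewrite author's own statement) =====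
-- stated objective: faster
-- what changed: B computes the list of repeated substrings once per distinct string (ordered dedup of proper substrings plus one count filter) and memoizes the recursion depth by string value in a dict, replacing A's scheme that calls work() twice per level and recurses separately on every duplicated occurrence; intended as faster (measured: A timed out at n=64 where B returned; at n=16 B read 1.79x, ratio at large sizes unconfirmed because A never finishes there).
import Mathlib
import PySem

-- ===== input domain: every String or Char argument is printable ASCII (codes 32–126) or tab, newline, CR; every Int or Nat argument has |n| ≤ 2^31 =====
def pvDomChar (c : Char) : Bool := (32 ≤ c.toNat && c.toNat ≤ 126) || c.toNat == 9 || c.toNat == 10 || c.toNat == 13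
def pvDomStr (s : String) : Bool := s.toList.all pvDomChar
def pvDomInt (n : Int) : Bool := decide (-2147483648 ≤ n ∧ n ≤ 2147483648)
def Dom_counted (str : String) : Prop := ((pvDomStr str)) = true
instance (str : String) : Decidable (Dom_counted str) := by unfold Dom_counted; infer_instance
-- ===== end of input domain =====

-- B memoizes the recursion by string value and recurses over the DEDUPLICATED list of repeated
-- substrings (computed once), replacing A's double work() recomputation; intended as faster
-- (measured: A timed out at n=64 where B returned; at n=16 B read 1.79x).

-- ===== PORT A =====
-- A's inline occurrence-count loop: 'num=0; for j in range(length-len(i)+1): if str[j:j+len(i)]==i: num=num+1'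
def pvNumA (s i : List Char) : Int :=
  (PySem.List.pyRange 0 ((s.length : Int) - (i.length : Int) + 1) 1).foldl
    (fun num j =>
      if PySem.List.slice s (some j) (some (j + (i.length : Int))) = i then num + 1 else num) 0

def workA (s : List Char) : List (List Char) :=
  let length : Int := s.length
  let result : List (List Char) :=
    (PySem.List.pyRange 1 (length + 1) 1).foldl
      (fun result j =>
        (PySem.List.pyRange 0 (length - j + 1) 1).foldl
          (fun result n => result ++ [PySem.List.slice s (some n) (some (n + j))]) result) []
  result.foldl
    (fun needed i => if pvNumA s i ≥ 2 then needed ++ [i] else needed) []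

-- needed by the termination proof of pvCountedA (cited in decreasing_by)
theorem pvWorkA_lt (s : List Char) : ∀ t ∈ workA s, t.length < s.length := by
  intro t ht
  have h2 : pvNumA s t ≥ 2 := by
    have h := ht
    simp [workA, PySem.List.foldl_append_ite_eq_filter] at h
    obtain ⟨j, hj, k, hk, ht', h2⟩ := h
    exact h2
  have hcnt : pvNumA s t =
      ((PySem.List.pyRange 0 ((s.length : Int) - (t.length : Int) + 1) 1).countP
        (fun j => decide (PySem.List.slice s (some j) (some (j + (t.length : Int))) = t)) : Nat) := by
    simpa [pvNumA] using
      PySem.List.foldl_count_if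
        (fun j => decide (PySem.List.slice s (some j) (some (j + (t.length : Int))) = t))
        (PySem.List.pyRange 0 ((s.length : Int) - (t.length : Int) + 1) 1) 0
  have hle : ((PySem.List.pyRange 0 ((s.length : Int) - (t.length : Int) + 1) 1).countP
        (fun j => decide (PySem.List.slice s (some j) (some (j + (t.length : Int))) = t)))
      ≤ (((s.length : Int) - (t.length : Int) + 1)).toNat := by
    simpa [PySem.List.length_pyRange_one] using
      List.countP_le_length (l := PySem.List.pyRange 0 ((s.length : Int) - (t.length : Int) + 1) 1)
        (p := fun j => decide (PySem.List.slice s (some j) (some (j + (t.length : Int))) = t))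
  omega

def pvCountedA (s : List Char) : Int :=
  if (workA s).length = 0 then 0
  else
    let numbers : List Int := (workA s).attach.map (fun i => pvCountedA i.1)
    (PySem.List.max? numbers (fun x => x)).getD 0 + 1
termination_by s.length
decreasing_by exact pvWorkA_lt s i.1 i.2

def counted (str : String) : Int := pvCountedA str.toList

-- ===== PORT B =====
-- B's occurrence count: 'sum(1 for k in range(n - len(t) + 1) if s[k:k + len(t)] == t)'
def pvNumB (s t : List Char) : Int :=
  (PySem.List.pyRange 0 ((s.length : Int) - (t.length : Int) + 1) 1).foldl
    (fun acc k =>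
      if PySem.List.slice s (some k) (some (k + (t.length : Int))) = t then acc + 1 else acc) 0

-- repeated_subs: ordered dedup (dict.fromkeys) of all proper substrings, then the count filter
def pvRepsB (s : List Char) : List (List Char) :=
  let n : Int := s.length
  let subs : List (List Char) :=
    PySem.List.dedup ((PySem.List.pyRange 1 n 1).flatMap (fun j =>
      (PySem.List.pyRange 0 (n - j + 1) 1).map
        (fun i => PySem.List.slice s (some i) (some (i + j)))))
  subs.filter (fun t => decide (pvNumB s t ≥ 2))

-- depth(s) with the memo dict threaded explicitly; fuel only makes the recursion structural
-- (every recursive call is on a strictly shorter string, so fuel = |s|+1 at the top never runs out)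
def pvDepthB (fuel : Nat) (memo : PySem.Dict (List Char) Int) (s : List Char) :
    Int × PySem.Dict (List Char) Int :=
  match fuel with
  | 0 => (0, memo)
  | fuel + 1 =>
    match memo.get? s with
    | some v => (v, memo)
    | none =>
      let reps := pvRepsB s
      let acc := reps.foldl
        (fun (p : Option Int × PySem.Dict (List Char) Int) t =>
          let r := pvDepthB fuel p.2 t
          (some (match p.1 with | none => r.1 | some m => max m r.1), r.2))
        ((none : Option Int), memo)
      let d : Int := match acc.1 with | none => 0 | some m => 1 + m
      (d, acc.2.insert s d)

def counted_alt (str : String) : Int :=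
  (pvDepthB (str.toList.length + 1) PySem.Dict.empty str.toList).1

-- ===== PRECONDITION & SPEC =====
def Spec_counted (str : String) (out : Int) : Prop := out = counted_alt str
instance (str : String) (out : Int) : Decidable (Spec_counted str out) := by unfold Spec_counted; infer_instance

-- ===== CLAIM (what is proved, stated in full; the proofs are below) =====
def Claim_equal_counted : Prop := ∀ (str : String), Dom_counted str → Spec_counted str (counted str)

-- ===== LEMMAS AND PROOFS =====

-- A's 'result' list (all substrings, by increasing length, the full string last)
def pvResult (s : List Char) : List (List Char) :=
  (PySem.List.pyRange 1 ((s.length : Int) + 1) 1).flatMap (fun j =>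
    (PySem.List.pyRange 0 ((s.length : Int) - j + 1) 1).map
      (fun n => PySem.List.slice s (some n) (some (n + j))))

-- B's comprehension base (all PROPER substrings)
def pvBase (s : List Char) : List (List Char) :=
  (PySem.List.pyRange 1 ((s.length : Int)) 1).flatMap (fun j =>
    (PySem.List.pyRange 0 ((s.length : Int) - j + 1) 1).map
      (fun i => PySem.List.slice s (some i) (some (i + j))))

theorem pvNumB_eq : pvNumB = pvNumA := rfl

theorem pvFlattenSingle (f : Int → List Char) (l : List Int) :
    (l.map (fun x => [f x])).flatten = l.map f := by
  induction l with
  | nil => simp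
  | cons a l ih => simp [ih]

theorem workA_eq (s : List Char) :
    workA s = (pvResult s).filter (fun x => decide (pvNumA s x ≥ 2)) := by
  simp [workA, pvResult, PySem.List.foldl_append_ite_eq_filter,
    List.flatMap_def, List.filter_flatten, List.map_map]
  apply congrArg List.flatten
  apply List.map_congr_left
  intro j hj
  simp only [Function.comp, pvFlattenSingle]

theorem pvRepsB_eq (s : List Char) :
    pvRepsB s = (PySem.List.dedup (pvBase s)).filter (fun x => decide (pvNumA s x ≥ 2)) := by
  simp [pvRepsB, pvBase, pvNumB_eq]

theorem pvResult_eq (s : List Char) (h : s ≠ []) : pvResult s = pvBase s ++ [s] := by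
  have hn : 1 ≤ (s.length : Int) := by
    have := List.length_pos_of_ne_nil h; omega
  unfold pvResult pvBase
  rw [PySem.List.pyRange_one_succ_right hn, List.flatMap_append]
  congr 1
  have h1 : (s.length : Int) - (s.length : Int) + 1 = 0 + 1 := by ring
  simp only [List.flatMap_cons, List.flatMap_nil, h1, PySem.List.pyRange_one_singleton]
  simp

theorem pvNumA_self (s : List Char) : pvNumA s s = 1 := by
  unfold pvNumA
  have h1 : (s.length : Int) - (s.length : Int) + 1 = 0 + 1 := by ring
  rw [h1, PySem.List.pyRange_one_singleton]
  simp

theorem pvReps_mem (s : List Char) (t : List Char) : t ∈ pvRepsB s ↔ t ∈ workA s := by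
  rw [pvRepsB_eq, workA_eq]
  by_cases h : s = []
  · subst h
    simp [pvBase, pvResult, PySem.List.pyRange_one_eq_nil]
  · rw [pvResult_eq s h]
    simp only [List.mem_filter, PySem.List.mem_dedup, List.mem_append, List.mem_singleton]
    constructor
    · rintro ⟨hmem, hp⟩
      exact ⟨Or.inl hmem, hp⟩
    · rintro ⟨hmem | hmem, hp⟩
      · exact ⟨hmem, hp⟩
      · subst hmem
        rw [decide_eq_true_iff, ge_iff_le, pvNumA_self] at hp
        omega

def pvIsMax (l : List Int) (m : Int) : Prop := m ∈ l ∧ ∀ y ∈ l, y ≤ m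

theorem pvFoldlMax_isMax (t : List Int) (x : Int) : pvIsMax (x :: t) (t.foldl max x) := by
  constructor
  · rcases PySem.List.foldl_max_mem t x with h | h
    · rw [h]; exact List.mem_cons_self
    · exact List.mem_cons_of_mem _ h
  · intro y hy
    rcases List.mem_cons.mp hy with h | h
    · rw [h]; exact (PySem.List.le_foldl_max t x).1
    · exact (PySem.List.le_foldl_max t x).2 y h

theorem pvIsMax_unique {l l' : List Int} {m m' : Int} (hmem : ∀ x, x ∈ l ↔ x ∈ l')
    (h : pvIsMax l m) (h' : pvIsMax l' m') : m = m' :=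
  le_antisymm (h'.2 m ((hmem m).mp h.1)) (h.2 m' ((hmem m').mpr h'.1))

-- the pure value-level max fold that the memoised fold computes in its first component
def pvOptMax (a : Option Int) (ts : List (List Char)) : Option Int :=
  ts.foldl (fun x t => some (match x with
    | none => pvCountedA t
    | some m => max m (pvCountedA t))) a

theorem pvOptMax_some (ts : List (List Char)) : ∀ m : Int,
    pvOptMax (some m) ts = some ((ts.map pvCountedA).foldl max m) := by
  induction ts with
  | nil => intro m; simp [pvOptMax]
  | cons t ts ih => intro m; simpa [pvOptMax] using ih (max m (pvCountedA t))

theorem pvOptMax_none_cons (t : List Char) (ts : List (List Char)) :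
    pvOptMax none (t :: ts) = some ((ts.map pvCountedA).foldl max (pvCountedA t)) := by
  simpa [pvOptMax] using pvOptMax_some ts (pvCountedA t)

def pvInv (memo : PySem.Dict (List Char) Int) : Prop :=
  ∀ k v, memo.get? k = some v → v = pvCountedA k

theorem pvInv_empty : pvInv PySem.Dict.empty := by
  intro k v h; simp [PySem.Dict.get?_empty] at h

theorem pvInv_insert (memo : PySem.Dict (List Char) Int) (h : pvInv memo) (k : List Char) :
    pvInv (memo.insert k (pvCountedA k)) := by
  intro k' v hv
  rw [PySem.Dict.get?_insert] at hv
  split at hv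
  · rename_i heq
    cases hv
    rw [heq]
  · exact h k' v hv

theorem pvFold_correct (f : Nat)
    (IH : ∀ (s : List Char) (memo : PySem.Dict (List Char) Int), pvInv memo → s.length < f →
      (pvDepthB f memo s).1 = pvCountedA s ∧ pvInv (pvDepthB f memo s).2) :
    ∀ (ts : List (List Char)) (memo : PySem.Dict (List Char) Int) (a : Option Int),
      pvInv memo → (∀ t ∈ ts, t.length < f) →
      (ts.foldl (fun (p : Option Int × PySem.Dict (List Char) Int) t =>
          let r := pvDepthB f p.2 t
          (some (match p.1 with | none => r.1 | some m => max m r.1), r.2)) (a, memo)).1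
        = pvOptMax a ts
      ∧ pvInv (ts.foldl (fun (p : Option Int × PySem.Dict (List Char) Int) t =>
          let r := pvDepthB f p.2 t
          (some (match p.1 with | none => r.1 | some m => max m r.1), r.2)) (a, memo)).2 := by
  intro ts
  induction ts with
  | nil => intro memo a hInv _; exact ⟨rfl, hInv⟩
  | cons t ts ih =>
    intro memo a hInv hlen
    obtain ⟨h1, h2⟩ := IH t memo hInv (hlen t (by simp))
    simp only [List.foldl_cons, h1]
    have := ih (pvDepthB f memo t).2
      (some (match a with | none => pvCountedA t | some m => max m (pvCountedA t)))
      h2 (fun u hu => hlen u (by simp [hu]))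
    simpa [pvOptMax] using this

theorem pvDepthB_correct (fuel : Nat) :
    ∀ (s : List Char) (memo : PySem.Dict (List Char) Int), pvInv memo → s.length < fuel →
      (pvDepthB fuel memo s).1 = pvCountedA s ∧ pvInv (pvDepthB fuel memo s).2 := by
  induction fuel with
  | zero => intro s memo _ h; omega
  | succ f IH =>
    intro s memo hInv hlt
    cases hg : memo.get? s with
    | some v =>
      refine ⟨?_, ?_⟩ <;> simp only [pvDepthB, hg]
      · exact hInv s v hg
      · exact hInv
    | none =>
      have hshort : ∀ t ∈ pvRepsB s, t.length < f := fun t ht => by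
        have h1 := pvWorkA_lt s t ((pvReps_mem s t).mp ht)
        omega
      have hfold := pvFold_correct f IH (pvRepsB s) memo none hInv hshort
      simp only [pvDepthB, hg]
      obtain ⟨hf1, hf2⟩ := hfold
      have hf1' : (List.foldl (fun (p : Option Int × PySem.Dict (List Char) Int) t =>
            (some (match p.1 with | none => (pvDepthB f p.2 t).1 | some m => max m (pvDepthB f p.2 t).1),
              (pvDepthB f p.2 t).2)) ((none : Option Int), memo) (pvRepsB s)).1
          = pvOptMax none (pvRepsB s) := hf1
      have hf2' : pvInv (List.foldl (fun (p : Option Int × PySem.Dict (List Char) Int) t =>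
            (some (match p.1 with | none => (pvDepthB f p.2 t).1 | some m => max m (pvDepthB f p.2 t).1),
              (pvDepthB f p.2 t).2)) ((none : Option Int), memo) (pvRepsB s)).2 := hf2
      rw [hf1']
      have hc : (match pvOptMax none (pvRepsB s) with | none => (0:Int) | some m => 1 + m)
          = pvCountedA s := by
        cases hreps : pvRepsB s with
        | nil =>
          have hw : workA s = [] := by
            rw [List.eq_nil_iff_forall_not_mem]
            intro t ht
            have hmem := (pvReps_mem s t).mpr ht
            rw [hreps] at hmem
            exact absurd hmem List.not_mem_nil
          rw [pvCountedA]
          simp [pvOptMax, hw]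
        | cons r rs =>
          have hr : r ∈ workA s := (pvReps_mem s r).mp (by rw [hreps]; exact List.mem_cons_self)
          rw [pvOptMax_none_cons]
          have hBmax : pvIsMax ((r :: rs).map pvCountedA)
              ((rs.map pvCountedA).foldl max (pvCountedA r)) := by
            simpa using pvFoldlMax_isMax (rs.map pvCountedA) (pvCountedA r)
          cases hw : workA s with
          | nil => rw [hw] at hr; exact absurd hr List.not_mem_nil
          | cons x xs =>
            have hAval : pvCountedA s = (xs.map pvCountedA).foldl max (pvCountedA x) + 1 := by
              have hnum : ((workA s).attach.map (fun i => pvCountedA i.1))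
                  = (workA s).map pvCountedA := by simp
              rw [pvCountedA, hnum, hw]
              simp [PySem.List.max?_id_cons]
            have hAmax : pvIsMax ((x :: xs).map pvCountedA)
                ((xs.map pvCountedA).foldl max (pvCountedA x)) := by
              simpa using pvFoldlMax_isMax (xs.map pvCountedA) (pvCountedA x)
            have hmemEq : ∀ y, y ∈ (x :: xs).map pvCountedA ↔ y ∈ (r :: rs).map pvCountedA := by
              intro y
              rw [← hw, ← hreps]
              simp only [List.mem_map]
              constructor
              · rintro ⟨u, hu, rfl⟩; exact ⟨u, (pvReps_mem s u).mpr hu, rfl⟩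
              · rintro ⟨u, hu, rfl⟩; exact ⟨u, (pvReps_mem s u).mp hu, rfl⟩
            have huniq := pvIsMax_unique hmemEq hAmax hBmax
            show 1 + ((rs.map pvCountedA).foldl max (pvCountedA r)) = pvCountedA s
            rw [← huniq, hAval]
            omega
      refine ⟨hc, ?_⟩
      rw [hc]
      exact pvInv_insert _ hf2' s

-- ===== VERDICT (by name: the statement is the Claim_ definition above) =====
theorem counted_spec : Claim_equal_counted := by
  intro str _
  unfold Spec_counted counted counted_alt
  exact ((pvDepthB_correct (str.toList.length + 1) str.toList PySem.Dict.empty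
    pvInv_empty (Nat.lt_succ_self _)).1).symm
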